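-- pv_equiv track=rewrite | github.com/tuananhbui89/COMPRESSION | reorder.py | create_order
-- ===== SOURCE A (Python) =====
-- def insideout(H, W):
-- 	curX = 0
-- 	curY = 0
-- 	direction = "down"
-- 	positions = []
-- 	positions.append((curX, curY))
-- 	ltop = 0
-- 	lbot = H
-- 	llef = 0
-- 	lrig = W
-- 	while (len(positions) < H*W):
-- 		if direction == 'down':
-- 			while curY < lbot-1:
-- 				curY += 1
-- 				positions.append((curX, curY))
-- 			llef += 1
-- 			direction = 'right'
-- 		elif direction == 'right':
-- 			while curX < lrig-1:
-- 				curX += 1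
-- 				positions.append((curX, curY))
-- 			lbot -= 1
-- 			direction = 'up'
-- 		elif direction == 'up':
-- 			while curY > ltop:
-- 				curY -= 1
-- 				positions.append((curX, curY))
-- 			lrig -= 1
-- 			direction = 'left'
-- 		elif direction == 'left':
-- 			while curX > llef:
-- 				curX -= 1
-- 				positions.append((curX, curY))
-- 			ltop += 1
-- 			direction = 'down'
--
-- 	return positions
--
-- def wave(H, W):
--     curX = 0
--     curY = 0
--     direction = "down"
--     positions = []
--     positions.append((curX, curY))
--     while not (curX == W-1 and curY == H-1):
--         if direction == "down":
--             if curY == H-1: #can't move down any more; move right instead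
--                 curX += 1
--             else:
--                 curY += 1
--             positions.append((curX, curY))
--             #move diagonally up and right
--             while curX < W-1 and curY > 0:
--                 curX += 1
--                 curY -= 1
--                 positions.append((curX, curY))
--             direction = "right"
--             continue
--         else: #direction == "right"
--             if curX == W-1: #can't move right any more; move down instead
--                 curY += 1
--             else:
--                 curX += 1
--             positions.append((curX, curY))
--             #move diagonally down and left
--             while curY < H-1 and curX > 0:
--                 curX -= 1
--                 curY += 1
--                 positions.append((curX, curY))
--             direction = "down"
--             continue
--
--     return positions
--
-- def create_order(H, W, method='ziczac'):
-- 	H = int(H)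
-- 	W = int(W)
-- 	if method == 'ziczac':
-- 		positions = wave(H, W)
-- 	elif method == 'insideout':
-- 		positions = insideout(H, W)
-- 	order = []
-- 	for x, y in positions:
-- 		index = x + y*W
-- 		order.extend([index])
-- 		# print index, x, y
-- 	return order
-- ===== SOURCE B (Python) =====
-- def _zigzag(H, W):
--     # enumerate anti-diagonals x+y=d; odd d ascending in x, even d descending
--     positions = []
--     for d in range(H + W - 1):
--         lo = max(0, d - (H - 1))
--         hi = min(d, W - 1)
--         xs = range(lo, hi + 1)
--         if d % 2 == 0:
--             xs = reversed(xs)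
--         for x in xs:
--             positions.append((x, d - x))
--     return positions
--
-- def _spiral(H, W):
--     # peel one boundary lap per iteration: left column down, bottom row right,
--     # right column up, top row left, then shrink the window
--     positions = []
--     t, b, l, r = 0, H, 0, W
--     while t < b and l < r:
--         for y in range(t, b):
--             positions.append((l, y))
--         for x in range(l + 1, r):
--             positions.append((x, b - 1))
--         if l + 1 < r:
--             for y in range(b - 2, t - 1, -1):
--                 positions.append((r - 1, y))
--         if t + 1 < b and l + 1 < r:
--             for x in range(r - 2, l, -1):
--                 positions.append((x, t))
--         t, b, l, r = t + 1, b - 1, l + 1, r - 1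
--     return positions
--
-- def create_order(H, W, method='ziczac'):
--     H = int(H)
--     W = int(W)
--     if method == 'ziczac':
--         positions = _zigzag(H, W)
--     elif method == 'insideout':
--         positions = _spiral(H, W)
--     return [x + y * W for x, y in positions]
-- ===== Notes on version B (the rewrite author's own statement) =====
-- stated objective: alternative
-- what changed: The zigzag is re-implemented by enumerating anti-diagonals x+y=d with alternating direction instead of simulating the walker's step-and-slide state machine, and the spiral by peeling one boundary lap per iteration with four range segments instead of the four-direction cursor machine with a global length check; the index list is built by a comprehension instead of foldl/extend.
-- intended difference: On degenerate 'insideout' grids (H <= 0 or W <= 0, i.e. no cells) A returns [0], the index of a non-existent cell appended before any bounds check, while B returns the intended empty list. — e.g. on create_order(0, 3, "insideout"): A returns [0], B returns []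
import Mathlib
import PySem

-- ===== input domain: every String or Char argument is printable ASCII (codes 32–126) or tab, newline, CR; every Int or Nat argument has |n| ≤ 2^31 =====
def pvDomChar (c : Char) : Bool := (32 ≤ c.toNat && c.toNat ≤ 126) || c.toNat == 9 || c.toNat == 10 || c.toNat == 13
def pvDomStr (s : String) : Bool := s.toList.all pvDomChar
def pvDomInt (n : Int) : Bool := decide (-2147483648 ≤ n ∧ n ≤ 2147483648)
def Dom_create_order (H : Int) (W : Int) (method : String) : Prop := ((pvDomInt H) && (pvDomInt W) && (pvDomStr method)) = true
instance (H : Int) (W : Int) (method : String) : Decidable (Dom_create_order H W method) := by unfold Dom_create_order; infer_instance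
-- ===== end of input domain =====

-- B re-implements the zigzag as anti-diagonal enumeration and the spiral as layer peeling
-- (alternative algorithms, same outputs); on degenerate `insideout` grids (H ≤ 0 or W ≤ 0)
-- A returns [0] while B returns [] — stated as the intended difference D_ below.

-- ===== PORT A =====
-- inner loop of wave, direction "down": move diagonally up-right
-- (loops are ported with an exact fuel bound: y only decreases while 0 < y, so y.toNat
-- iterations always suffice and the fuel never runs out before the loop condition fails)
def waveDiagUpF (W : Int) : Nat → Int → Int → List (Int × Int) → Int × Int × List (Int × Int)
  | 0, x, y, ps => (x, y, ps)
  | fuel + 1, x, y, ps =>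
    if x < W - 1 ∧ 0 < y then waveDiagUpF W fuel (x + 1) (y - 1) (ps ++ [(x + 1, y - 1)])
    else (x, y, ps)

def waveDiagUp (W : Int) (x y : Int) (ps : List (Int × Int)) : Int × Int × List (Int × Int) :=
  waveDiagUpF W y.toNat x y ps

-- inner loop of wave, direction "right": move diagonally down-left
def waveDiagDownF (H : Int) : Nat → Int → Int → List (Int × Int) → Int × Int × List (Int × Int)
  | 0, x, y, ps => (x, y, ps)
  | fuel + 1, x, y, ps =>
    if y < H - 1 ∧ 0 < x then waveDiagDownF H fuel (x - 1) (y + 1) (ps ++ [(x - 1, y + 1)])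
    else (x, y, ps)

def waveDiagDown (H : Int) (x y : Int) (ps : List (Int × Int)) : Int × Int × List (Int × Int) :=
  waveDiagDownF H x.toNat x y ps

-- outer while-loop of wave; fuel models the unbounded `while` (exhaustion = non-termination,
-- which only happens outside Pre_)
def waveLoop (H W : Int) (fuel : Nat) (x y : Int) (dir : String) (ps : List (Int × Int)) :
    List (Int × Int) :=
  match fuel with
  | 0 => ps
  | fuel + 1 =>
    if x = W - 1 ∧ y = H - 1 then ps
    else if dir = "down" then
      let p : Int × Int := if y = H - 1 then (x + 1, y) else (x, y + 1)
      let r := waveDiagUp W p.1 p.2 (ps ++ [p])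
      waveLoop H W fuel r.1 r.2.1 "right" r.2.2
    else
      let p : Int × Int := if x = W - 1 then (x, y + 1) else (x + 1, y)
      let r := waveDiagDown H p.1 p.2 (ps ++ [p])
      waveLoop H W fuel r.1 r.2.1 "down" r.2.2

def wave (H W : Int) : List (Int × Int) :=
  waveLoop H W (H + W).toNat 0 0 "down" [(0, 0)]

-- the four inner while-loops of insideout, again with exact fuel bounds
def ioDownF (lbot x : Int) : Nat → Int → List (Int × Int) → Int × List (Int × Int)
  | 0, y, ps => (y, ps)
  | fuel + 1, y, ps =>
    if y < lbot - 1 then ioDownF lbot x fuel (y + 1) (ps ++ [(x, y + 1)]) else (y, ps)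

def ioDown (lbot x y : Int) (ps : List (Int × Int)) : Int × List (Int × Int) :=
  ioDownF lbot x (lbot - 1 - y).toNat y ps

def ioRightF (lrig y : Int) : Nat → Int → List (Int × Int) → Int × List (Int × Int)
  | 0, x, ps => (x, ps)
  | fuel + 1, x, ps =>
    if x < lrig - 1 then ioRightF lrig y fuel (x + 1) (ps ++ [(x + 1, y)]) else (x, ps)

def ioRight (lrig x y : Int) (ps : List (Int × Int)) : Int × List (Int × Int) :=
  ioRightF lrig y (lrig - 1 - x).toNat x ps

def ioUpF (ltop x : Int) : Nat → Int → List (Int × Int) → Int × List (Int × Int)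
  | 0, y, ps => (y, ps)
  | fuel + 1, y, ps =>
    if ltop < y then ioUpF ltop x fuel (y - 1) (ps ++ [(x, y - 1)]) else (y, ps)

def ioUp (ltop x y : Int) (ps : List (Int × Int)) : Int × List (Int × Int) :=
  ioUpF ltop x (y - ltop).toNat y ps

def ioLeftF (llef y : Int) : Nat → Int → List (Int × Int) → Int × List (Int × Int)
  | 0, x, ps => (x, ps)
  | fuel + 1, x, ps =>
    if llef < x then ioLeftF llef y fuel (x - 1) (ps ++ [(x - 1, y)]) else (x, ps)

def ioLeft (llef x y : Int) (ps : List (Int × Int)) : Int × List (Int × Int) :=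
  ioLeftF llef y (x - llef).toNat x ps

-- outer while-loop of insideout (length check each iteration, one direction phase per iteration)
def ioLoop (H W : Int) (fuel : Nat) (x y : Int) (dir : String) (ps : List (Int × Int))
    (ltop lbot llef lrig : Int) : List (Int × Int) :=
  match fuel with
  | 0 => ps
  | fuel + 1 =>
    if (ps.length : Int) < H * W then
      if dir = "down" then
        let r := ioDown lbot x y ps
        ioLoop H W fuel x r.1 "right" r.2 ltop lbot (llef + 1) lrig
      else if dir = "right" then
        let r := ioRight lrig x y ps
        ioLoop H W fuel r.1 y "up" r.2 ltop (lbot - 1) llef lrig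
      else if dir = "up" then
        let r := ioUp ltop x y ps
        ioLoop H W fuel x r.1 "left" r.2 ltop lbot llef (lrig - 1)
      else if dir = "left" then
        let r := ioLeft llef x y ps
        ioLoop H W fuel r.1 y "down" r.2 (ltop + 1) lbot llef lrig
      else ioLoop H W fuel x y dir ps ltop lbot llef lrig   -- unreachable dir: loop body is a no-op
    else ps

def insideout (H W : Int) : List (Int × Int) :=
  ioLoop H W ((4 * (H + W)).toNat + 4) 0 0 "down" [(0, 0)] 0 H 0 W

def create_order (H : Int) (W : Int) (method : String) : List Int :=
  -- H = int(H); W = int(W) : identity on Int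
  let positions :=
    if method = "ziczac" then wave H W
    else if method = "insideout" then insideout H W
    else []   -- Python raises NameError here; outside Pre_
  positions.foldl (fun acc p => acc ++ [p.1 + p.2 * W]) []

-- ===== PORT B =====
-- one anti-diagonal x + y = d, ascending in x for odd d, descending for even d
def zzDiag (H W d : Int) : List (Int × Int) :=
  let lo := max 0 (d - (H - 1))
  let hi := min d (W - 1)
  let xs := PySem.List.pyRange lo (hi + 1) 1
  let xs := if d % 2 == 0 then xs.reverse else xs
  xs.map (fun x => (x, d - x))

def zigzagB (H W : Int) : List (Int × Int) :=
  (PySem.List.pyRange 0 (H + W - 1) 1).flatMap (fun d => zzDiag H W d)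

-- peel one boundary lap per iteration, then shrink the window; b - t shrinks by 2 per lap,
-- so (b - t).toNat iterations always suffice before the loop condition fails
def peelF : Nat → Int → Int → Int → Int → List (Int × Int)
  | 0, _, _, _, _ => []
  | fuel + 1, t, b, l, r =>
    if t < b ∧ l < r then
      ((PySem.List.pyRange t b 1).map (fun y => (l, y))
        ++ (PySem.List.pyRange (l + 1) r 1).map (fun x => (x, b - 1))
        ++ (if l + 1 < r then (PySem.List.pyRange (b - 2) (t - 1) (-1)).map (fun y => (r - 1, y)) else [])
        ++ (if t + 1 < b ∧ l + 1 < r then (PySem.List.pyRange (r - 2) l (-1)).map (fun x => (x, t)) else []))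
        ++ peelF fuel (t + 1) (b - 1) (l + 1) (r - 1)
    else []

def peel (t b l r : Int) : List (Int × Int) :=
  peelF (b - t).toNat t b l r

def create_order_alt (H : Int) (W : Int) (method : String) : List Int :=
  let positions :=
    if method = "ziczac" then zigzagB H W
    else if method = "insideout" then peel 0 H 0 W
    else []   -- Python raises NameError here; outside Pre_
  positions.map (fun p => p.1 + p.2 * W)

-- ===== PRECONDITION & SPEC =====
-- Pre_ is exactly the set of inputs on which A returns: an unknown method raises NameError,
-- `ziczac` diverges unless H ≥ 1 and W ≥ 1, and `insideout` diverges unless H ≥ 1 and W ≥ 1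
-- or H*W ≤ 1 (when the length check stops the loop at once).
def Pre_create_order (H : Int) (W : Int) (method : String) : Prop :=
  (method = "ziczac" ∧ 1 ≤ H ∧ 1 ≤ W) ∨
  (method = "insideout" ∧ ((1 ≤ H ∧ 1 ≤ W) ∨ H * W ≤ 1))
instance (H : Int) (W : Int) (method : String) : Decidable (Pre_create_order H W method) := by
  unfold Pre_create_order; infer_instance

def pvWitness_create_order : Int × Int × String := (3, 4, "ziczac")

-- On degenerate `insideout` grids (H ≤ 0 or W ≤ 0, i.e. zero cells) A returns [0] — the index of
-- a cell that does not exist, appended before any bounds check — while B returns the intended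
-- empty order.
def D_create_order (H : Int) (W : Int) (method : String) : Prop :=
  method = "insideout" ∧ ¬(1 ≤ H ∧ 1 ≤ W)
instance (H : Int) (W : Int) (method : String) : Decidable (D_create_order H W method) := by
  unfold D_create_order; infer_instance

def Spec_create_order (H : Int) (W : Int) (method : String) (out : List Int) : Prop :=
  ¬ D_create_order H W method → out = create_order_alt H W method
instance (H : Int) (W : Int) (method : String) (out : List Int) :
    Decidable (Spec_create_order H W method out) := by unfold Spec_create_order; infer_instance

def pvDiffWitness_create_order : Int × Int × String := (0, 3, "insideout")
def pvDiffWitnessOut_create_order : (List Int) × (List Int) := ([0], [])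

-- ===== CLAIM (what is proved, stated in full; the proofs are below) =====
def Claim_unchanged_create_order : Prop := ∀ (H : Int) (W : Int) (method : String), Dom_create_order H W method → Pre_create_order H W method → Spec_create_order H W method (create_order H W method)
def Claim_changed_create_order : Prop := Dom_create_order (pvDiffWitness_create_order.1) (pvDiffWitness_create_order.2.1) (pvDiffWitness_create_order.2.2) ∧ Pre_create_order (pvDiffWitness_create_order.1) (pvDiffWitness_create_order.2.1) (pvDiffWitness_create_order.2.2) ∧ D_create_order (pvDiffWitness_create_order.1) (pvDiffWitness_create_order.2.1) (pvDiffWitness_create_order.2.2) ∧ create_order (pvDiffWitness_create_order.1) (pvDiffWitness_create_order.2.1) (pvDiffWitness_create_order.2.2) = pvDiffWitnessOut_create_order.1 ∧ create_order_alt (pvDiffWitness_create_order.1) (pvDiffWitness_create_order.2.1) (pvDiffWitness_create_order.2.2) = pvDiffWitnessOut_create_order.2 ∧ pvDiffWitnessOut_create_order.1 ≠ pvDiffWitnessOut_create_order.2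
def Claim_exact_create_order : Prop := ∀ (H : Int) (W : Int) (method : String), Dom_create_order H W method → Pre_create_order H W method → D_create_order H W method → create_order H W method ≠ create_order_alt H W method

-- ===== LEMMAS AND PROOFS =====

theorem waveDiagUpF_le (W d : Int) : ∀ (n : Nat) (x : Int) (ps : List (Int × Int)),
    x ≤ d → x ≤ W - 1 → (min d (W - 1) - x).toNat ≤ n →
    waveDiagUpF W n x (d - x) ps
      = (min d (W - 1), d - min d (W - 1),
          ps ++ (PySem.List.pyRange (x + 1) (min d (W - 1) + 1) 1).map (fun t => (t, d - t))) := by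
  intro n
  induction n with
  | zero =>
    intro x ps hxd hxw hn
    have hm : min d (W - 1) = x := by omega
    rw [waveDiagUpF, hm, PySem.List.pyRange_one_eq_nil (by omega)]
    simp
  | succ n ih =>
    intro x ps hxd hxw hn
    by_cases hlt : x < min d (W - 1)
    · rw [waveDiagUpF, if_pos (by constructor <;> omega)]
      have h1 : d - x - 1 = d - (x + 1) := by ring
      rw [h1, ih (x + 1) _ (by omega) (by omega) (by omega),
        PySem.List.pyRange_one_cons (by omega : x + 1 < min d (W - 1) + 1)]
      simp
    · have hm : min d (W - 1) = x := by omega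
      rw [waveDiagUpF, if_neg (by omega), hm, PySem.List.pyRange_one_eq_nil (by omega)]
      simp

theorem waveDiagUp_eq (W d : Int) : ∀ (n : Nat) (x : Int) (ps : List (Int × Int)),
    x ≤ d → x ≤ W - 1 → (min d (W - 1) - x).toNat = n →
    waveDiagUp W x (d - x) ps
      = (min d (W - 1), d - min d (W - 1),
          ps ++ (PySem.List.pyRange (x + 1) (min d (W - 1) + 1) 1).map (fun t => (t, d - t))) := by
  intro n x ps hxd hxw _
  rw [waveDiagUp]
  exact waveDiagUpF_le W d (d - x).toNat x ps hxd hxw (by omega)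

theorem waveDiagDownF_le (H d : Int) : ∀ (n : Nat) (x : Int) (ps : List (Int × Int)),
    d - x ≤ H - 1 → 0 ≤ x → (x - max 0 (d - (H - 1))).toNat ≤ n →
    waveDiagDownF H n x (d - x) ps
      = (max 0 (d - (H - 1)), d - max 0 (d - (H - 1)),
          ps ++ (PySem.List.pyRange (x - 1) (max 0 (d - (H - 1)) - 1) (-1)).map (fun t => (t, d - t))) := by
  intro n
  induction n with
  | zero =>
    intro x ps hxd hx hn
    have hm : max 0 (d - (H - 1)) = x := by omega
    rw [waveDiagDownF, hm, PySem.List.pyRange_neg_one_eq_nil (by omega)]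
    simp
  | succ n ih =>
    intro x ps hxd hx hn
    by_cases hgt : max 0 (d - (H - 1)) < x
    · rw [waveDiagDownF, if_pos (by constructor <;> omega)]
      have h1 : d - x + 1 = d - (x - 1) := by ring
      rw [h1, ih (x - 1) _ (by omega) (by omega) (by omega),
        PySem.List.pyRange_neg_one_cons (by omega : max 0 (d - (H - 1)) - 1 < x - 1)]
      simp
    · have hm : max 0 (d - (H - 1)) = x := by omega
      rw [waveDiagDownF, if_neg (by omega), hm, PySem.List.pyRange_neg_one_eq_nil (by omega)]
      simp

theorem waveDiagDown_eq (H d : Int) : ∀ (n : Nat) (x : Int) (ps : List (Int × Int)),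
    d - x ≤ H - 1 → 0 ≤ x → (x - max 0 (d - (H - 1))).toNat = n →
    waveDiagDown H x (d - x) ps
      = (max 0 (d - (H - 1)), d - max 0 (d - (H - 1)),
          ps ++ (PySem.List.pyRange (x - 1) (max 0 (d - (H - 1)) - 1) (-1)).map (fun t => (t, d - t))) := by
  intro n x ps hxd hx _
  rw [waveDiagDown]
  exact waveDiagDownF_le H d x.toNat x ps hxd hx (by omega)

def endX (H W d : Int) : Int := if d % 2 = 0 then max 0 (d - (H - 1)) else min d (W - 1)
def dirOf (d : Int) : String := if d % 2 = 0 then "down" else "right"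

-- the d-th anti-diagonal, as B builds it
theorem zzDiag_odd (H W d : Int) (hd : d % 2 = 1) :
    zzDiag H W d
      = (PySem.List.pyRange (max 0 (d - (H - 1))) (min d (W - 1) + 1) 1).map (fun t => (t, d - t)) := by
  simp [zzDiag, hd]

theorem zzDiag_even (H W d : Int) (hd : d % 2 = 0) :
    zzDiag H W d
      = ((PySem.List.pyRange (max 0 (d - (H - 1))) (min d (W - 1) + 1) 1).reverse).map
          (fun t => (t, d - t)) := by
  simp [zzDiag, hd]

theorem waveLoop_eq (H W : Int) (hH : 1 ≤ H) (hW : 1 ≤ W) :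
    ∀ (k fuel : Nat) (d : Int) (ps : List (Int × Int)),
    0 ≤ d → d + (k : Int) = H + W - 2 → k ≤ fuel →
    waveLoop H W fuel (endX H W d) (d - endX H W d) (dirOf d) ps
      = ps ++ (PySem.List.pyRange (d + 1) (H + W - 1) 1).flatMap (fun e => zzDiag H W e) := by
  intro k
  induction k with
  | zero =>
    intro fuel d ps hd hsum hfuel
    have hx : endX H W d = W - 1 := by unfold endX; split <;> omega
    have hy : d - endX H W d = H - 1 := by omega
    rw [PySem.List.pyRange_one_eq_nil (by omega)]
    cases fuel with
    | zero => simp [waveLoop]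
    | succ f => rw [waveLoop, if_pos ⟨hx, hy⟩]; simp
  | succ k ih =>
    intro fuel d ps hd hsum hfuel
    have hdlt : d ≤ H + W - 3 := by omega
    obtain ⟨f, rfl⟩ : ∃ f, fuel = f + 1 := ⟨fuel - 1, by omega⟩
    have hne : ¬(endX H W d = W - 1 ∧ d - endX H W d = H - 1) := by
      intro ⟨h1, h2⟩; omega
    rw [waveLoop, if_neg hne]
    rcases Int.emod_two_eq_zero_or_one d with hpar | hpar
    · -- "down" phase: traverse diagonal d+1 ascending
      have hdir : dirOf d = "down" := by simp [dirOf, hpar]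
      have hx : endX H W d = max 0 (d - (H - 1)) := by simp [endX, hpar]
      rw [hdir, if_pos rfl, hx]
      set s : Int := max 0 (d + 1 - (H - 1)) with hs
      have hstep : (if d - max 0 (d - (H - 1)) = H - 1 then
            (max 0 (d - (H - 1)) + 1, d - max 0 (d - (H - 1)))
          else (max 0 (d - (H - 1)), d - max 0 (d - (H - 1)) + 1)) = (s, (d + 1) - s) := by
        split <;> (simp only [Prod.mk.injEq]; exact ⟨by omega, by omega⟩)
      rw [hstep]; simp only []
      have hup := waveDiagUp_eq W (d + 1) (min (d + 1) (W - 1) - s).toNat s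
        (ps ++ [(s, d + 1 - s)]) (by omega) (by omega) rfl
      rw [hup]; simp only []
      have hm1 : min (d + 1) (W - 1) = endX H W (d + 1) := by
        simp [endX]; omega
      have hcons : (s, d + 1 - s) :: (PySem.List.pyRange (s + 1) (min (d + 1) (W - 1) + 1) 1).map
            (fun t => (t, d + 1 - t)) = zzDiag H W (d + 1) := by
        rw [zzDiag_odd H W (d + 1) (by omega)]
        rw [show max 0 (d + 1 - (H - 1)) = s from rfl,
          PySem.List.pyRange_one_cons (by omega : s < min (d + 1) (W - 1) + 1)]
        simp
      have hrec := ih f (d + 1) (ps ++ [(s, d + 1 - s)]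
          ++ (PySem.List.pyRange (s + 1) (min (d + 1) (W - 1) + 1) 1).map (fun t => (t, d + 1 - t)))
        (by omega) (by omega) (by omega)
      have hdir1 : dirOf (d + 1) = "right" := by simp [dirOf]; omega
      simp only [← hm1, hdir1] at hrec
      rw [hrec, PySem.List.pyRange_one_cons (by omega : d + 1 < H + W - 1), List.flatMap_cons,
        ← hcons]
      simp
    · -- "right" phase: traverse diagonal d+1 descending
      have hdir : dirOf d = "right" := by simp [dirOf, hpar]
      have hx : endX H W d = min d (W - 1) := by simp [endX, hpar]
      rw [hdir, if_neg (by decide), hx]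
      set s : Int := min (d + 1) (W - 1) with hs
      have hstep : (if min d (W - 1) = W - 1 then (min d (W - 1), d - min d (W - 1) + 1)
          else (min d (W - 1) + 1, d - min d (W - 1))) = (s, (d + 1) - s) := by
        split <;> (simp only [Prod.mk.injEq]; exact ⟨by omega, by omega⟩)
      rw [hstep]; simp only []
      have hdn := waveDiagDown_eq H (d + 1) (s - max 0 (d + 1 - (H - 1))).toNat s
        (ps ++ [(s, d + 1 - s)]) (by omega) (by omega) rfl
      rw [hdn]; simp only []
      set lo : Int := max 0 (d + 1 - (H - 1)) with hlo
      have hm1 : lo = endX H W (d + 1) := by simp [endX]; omega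
      have hcons : (s, d + 1 - s) :: (PySem.List.pyRange (s - 1) (lo - 1) (-1)).map
            (fun t => (t, d + 1 - t)) = zzDiag H W (d + 1) := by
        rw [zzDiag_even H W (d + 1) (by omega)]
        have hlist : PySem.List.pyRange s (lo - 1) (-1)
            = (PySem.List.pyRange lo (s + 1) 1).reverse := by
          rw [PySem.List.pyRange_neg_one_eq_reverse s (lo - 1)]; norm_num
        rw [show max 0 (d + 1 - (H - 1)) = lo from rfl, show min (d + 1) (W - 1) = s from rfl,
          ← hlist, PySem.List.pyRange_neg_one_cons (by omega : lo - 1 < s)]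
        simp
      have hrec := ih f (d + 1) (ps ++ [(s, d + 1 - s)]
          ++ (PySem.List.pyRange (s - 1) (lo - 1) (-1)).map (fun t => (t, d + 1 - t)))
        (by omega) (by omega) (by omega)
      have hdir1 : dirOf (d + 1) = "down" := by simp [dirOf]; omega
      simp only [← hm1, hdir1] at hrec
      rw [hrec, PySem.List.pyRange_one_cons (by omega : d + 1 < H + W - 1), List.flatMap_cons,
        ← hcons]
      simp

theorem wave_eq_zigzag (H W : Int) (hH : 1 ≤ H) (hW : 1 ≤ W) : wave H W = zigzagB H W := by
  have hx : endX H W 0 = 0 := by unfold endX; norm_num; omega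
  have hdir : dirOf 0 = "down" := by simp [dirOf]
  have h0 := waveLoop_eq H W hH hW (H + W - 2).toNat (H + W).toNat 0 [(0, 0)] le_rfl
    (by omega) (by omega)
  rw [hx, hdir] at h0
  norm_num at h0
  have hz : zzDiag H W 0 = [(0, 0)] := by
    unfold zzDiag
    rw [show max 0 (0 - (H - 1)) = 0 by omega, show min 0 (W - 1) = 0 by omega]
    have h1 : PySem.List.pyRange (0 : Int) 1 1 = [0] := by decide
    norm_num [h1]
  rw [wave, h0, zigzagB, PySem.List.pyRange_one_cons (by omega : (0 : Int) < H + W - 1),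
    List.flatMap_cons, hz]
  simp

theorem ioDownF_le (lbot x : Int) : ∀ (n : Nat) (y : Int) (ps : List (Int × Int)),
    y ≤ lbot - 1 → (lbot - 1 - y).toNat ≤ n →
    ioDownF lbot x n y ps
      = (lbot - 1, ps ++ (PySem.List.pyRange (y + 1) lbot 1).map (fun yy => (x, yy))) := by
  intro n
  induction n with
  | zero =>
    intro y ps hy hn
    rw [ioDownF, PySem.List.pyRange_one_eq_nil (by omega)]
    simp; omega
  | succ n ih =>
    intro y ps hy hn
    by_cases hc : y < lbot - 1
    · rw [ioDownF, if_pos hc, ih (y + 1) _ (by omega) (by omega),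
        PySem.List.pyRange_one_cons (by omega : y + 1 < lbot)]
      simp
    · rw [ioDownF, if_neg hc, PySem.List.pyRange_one_eq_nil (by omega)]
      simp; omega

theorem ioDown_eq (lbot x : Int) : ∀ (n : Nat) (y : Int) (ps : List (Int × Int)),
    y ≤ lbot - 1 → (lbot - 1 - y).toNat = n →
    ioDown lbot x y ps
      = (lbot - 1, ps ++ (PySem.List.pyRange (y + 1) lbot 1).map (fun yy => (x, yy))) := by
  intro n y ps hy _
  rw [ioDown]
  exact ioDownF_le lbot x _ y ps hy le_rfl

theorem ioRightF_le (lrig y : Int) : ∀ (n : Nat) (x : Int) (ps : List (Int × Int)),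
    x ≤ lrig - 1 → (lrig - 1 - x).toNat ≤ n →
    ioRightF lrig y n x ps
      = (lrig - 1, ps ++ (PySem.List.pyRange (x + 1) lrig 1).map (fun xx => (xx, y))) := by
  intro n
  induction n with
  | zero =>
    intro x ps hx hn
    rw [ioRightF, PySem.List.pyRange_one_eq_nil (by omega)]
    simp; omega
  | succ n ih =>
    intro x ps hx hn
    by_cases hc : x < lrig - 1
    · rw [ioRightF, if_pos hc, ih (x + 1) _ (by omega) (by omega),
        PySem.List.pyRange_one_cons (by omega : x + 1 < lrig)]
      simp
    · rw [ioRightF, if_neg hc, PySem.List.pyRange_one_eq_nil (by omega)]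
      simp; omega

theorem ioRight_eq (lrig y : Int) : ∀ (n : Nat) (x : Int) (ps : List (Int × Int)),
    x ≤ lrig - 1 → (lrig - 1 - x).toNat = n →
    ioRight lrig x y ps
      = (lrig - 1, ps ++ (PySem.List.pyRange (x + 1) lrig 1).map (fun xx => (xx, y))) := by
  intro n x ps hx _
  rw [ioRight]
  exact ioRightF_le lrig y _ x ps hx le_rfl

theorem ioUpF_le (ltop x : Int) : ∀ (n : Nat) (y : Int) (ps : List (Int × Int)),
    ltop ≤ y → (y - ltop).toNat ≤ n →
    ioUpF ltop x n y ps
      = (ltop, ps ++ (PySem.List.pyRange (y - 1) (ltop - 1) (-1)).map (fun yy => (x, yy))) := by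
  intro n
  induction n with
  | zero =>
    intro y ps hy hn
    rw [ioUpF, PySem.List.pyRange_neg_one_eq_nil (by omega)]
    simp; omega
  | succ n ih =>
    intro y ps hy hn
    by_cases hc : ltop < y
    · rw [ioUpF, if_pos hc, ih (y - 1) _ (by omega) (by omega),
        PySem.List.pyRange_neg_one_cons (by omega : ltop - 1 < y - 1)]
      simp
    · rw [ioUpF, if_neg hc, PySem.List.pyRange_neg_one_eq_nil (by omega)]
      simp; omega

theorem ioUp_eq (ltop x : Int) : ∀ (n : Nat) (y : Int) (ps : List (Int × Int)),
    ltop ≤ y → (y - ltop).toNat = n →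
    ioUp ltop x y ps
      = (ltop, ps ++ (PySem.List.pyRange (y - 1) (ltop - 1) (-1)).map (fun yy => (x, yy))) := by
  intro n y ps hy _
  rw [ioUp]
  exact ioUpF_le ltop x _ y ps hy le_rfl

theorem ioLeftF_le (llef y : Int) : ∀ (n : Nat) (x : Int) (ps : List (Int × Int)),
    llef ≤ x → (x - llef).toNat ≤ n →
    ioLeftF llef y n x ps
      = (llef, ps ++ (PySem.List.pyRange (x - 1) (llef - 1) (-1)).map (fun xx => (xx, y))) := by
  intro n
  induction n with
  | zero =>
    intro x ps hx hn
    rw [ioLeftF, PySem.List.pyRange_neg_one_eq_nil (by omega)]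
    simp; omega
  | succ n ih =>
    intro x ps hx hn
    by_cases hc : llef < x
    · rw [ioLeftF, if_pos hc, ih (x - 1) _ (by omega) (by omega),
        PySem.List.pyRange_neg_one_cons (by omega : llef - 1 < x - 1)]
      simp
    · rw [ioLeftF, if_neg hc, PySem.List.pyRange_neg_one_eq_nil (by omega)]
      simp; omega

theorem ioLeft_eq (llef y : Int) : ∀ (n : Nat) (x : Int) (ps : List (Int × Int)),
    llef ≤ x → (x - llef).toNat = n →
    ioLeft llef x y ps
      = (llef, ps ++ (PySem.List.pyRange (x - 1) (llef - 1) (-1)).map (fun xx => (xx, y))) := by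
  intro n x ps hx _
  rw [ioLeft]
  exact ioLeftF_le llef y _ x ps hx le_rfl

theorem peelF_le : ∀ (n : Nat) (t b l r : Int), (b - t).toNat ≤ n →
    peelF n t b l r = peel t b l r := by
  intro n
  induction n using Nat.strong_induction_on with
  | _ n ih =>
  intro t b l r hn
  match n, hn with
  | 0, hn =>
    rw [peel, show (b - t).toNat = 0 by omega, peelF]
  | (n + 1), hn =>
    by_cases hg : t < b ∧ l < r
    · obtain ⟨m, hm⟩ : ∃ m, (b - t).toNat = m + 1 := ⟨(b - t).toNat - 1, by omega⟩
      rw [peelF, if_pos hg, peel, hm, peelF, if_pos hg,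
        ih n (by omega) (t + 1) (b - 1) (l + 1) (r - 1) (by omega),
        ih m (by omega) (t + 1) (b - 1) (l + 1) (r - 1) (by omega)]
    · rw [peelF, if_neg hg, peel]
      rcases Nat.eq_zero_or_pos (b - t).toNat with h0 | h0
      · rw [h0, peelF]
      · obtain ⟨m, hm⟩ : ∃ m, (b - t).toNat = m + 1 := ⟨(b - t).toNat - 1, by omega⟩
        rw [hm, peelF, if_neg hg]

-- the one-lap unfolding of peel (Source B's while-loop body)
theorem peel_unfold (t b l r : Int) :
    peel t b l r
      = if t < b ∧ l < r then
          ((PySem.List.pyRange t b 1).map (fun y => (l, y))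
            ++ (PySem.List.pyRange (l + 1) r 1).map (fun x => (x, b - 1))
            ++ (if l + 1 < r then (PySem.List.pyRange (b - 2) (t - 1) (-1)).map (fun y => (r - 1, y)) else [])
            ++ (if t + 1 < b ∧ l + 1 < r then (PySem.List.pyRange (r - 2) l (-1)).map (fun x => (x, t)) else []))
            ++ peel (t + 1) (b - 1) (l + 1) (r - 1)
        else [] := by
  by_cases hg : t < b ∧ l < r
  · obtain ⟨m, hm⟩ : ∃ m, (b - t).toNat = m + 1 := ⟨(b - t).toNat - 1, by omega⟩
    rw [peel, hm, peelF, if_pos hg, if_pos hg,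
      peelF_le m (t + 1) (b - 1) (l + 1) (r - 1) (by omega)]
  · rw [peel, if_neg hg]
    rcases Nat.eq_zero_or_pos (b - t).toNat with h0 | h0
    · rw [h0, peelF]
    · obtain ⟨m, hm⟩ : ∃ m, (b - t).toNat = m + 1 := ⟨(b - t).toNat - 1, by omega⟩
      rw [hm, peelF, if_neg hg]

-- `peel` minus its leading-- `peel` minus its leading left-column segment
def peelR (t b l r : Int) : List (Int × Int) :=
  (PySem.List.pyRange (l + 1) r 1).map (fun x => (x, b - 1))
  ++ (if l + 1 < r then (PySem.List.pyRange (b - 2) (t - 1) (-1)).map (fun y => (r - 1, y)) else [])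
  ++ (if t + 1 < b ∧ l + 1 < r then (PySem.List.pyRange (r - 2) l (-1)).map (fun x => (x, t)) else [])
  ++ peel (t + 1) (b - 1) (l + 1) (r - 1)

theorem peel_eq (t b l r : Int) (ht : t < b) (hl : l < r) :
    peel t b l r = (PySem.List.pyRange t b 1).map (fun y => (l, y)) ++ peelR t b l r := by
  rw [peel_unfold, if_pos ⟨ht, hl⟩]
  simp [peelR, List.append_assoc]

theorem ioLoopR_eq (H W : Int) : ∀ (k : Nat) (fuel : Nat) (t b l r : Int) (ps : List (Int × Int)),
    t < b → l < r → b - t ≤ 2 * (k : Int) + 1 → 4 * k + 4 ≤ fuel →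
    (ps.length : Int) = H * W - (b - t) * (r - l - 1) →
    ioLoop H W fuel l (b - 1) "right" ps t b (l + 1) r = ps ++ peelR t b l r := by
  intro k
  induction k using Nat.strong_induction_on with
  | _ k ih =>
  intro fuel t b l r ps ht hl hk hfuel hlen
  obtain ⟨f1, rfl⟩ : ∃ f, fuel = f + 1 := ⟨fuel - 1, by omega⟩
  rw [ioLoop]
  by_cases hr2 : l + 2 ≤ r
  case neg =>
    -- r = l + 1: the remaining region is a single column already emitted; exit at once
    have hr1 : r = l + 1 := by omega
    rw [if_neg (by rw [hlen, hr1]; simp)]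
    rw [peelR, hr1, PySem.List.pyRange_one_eq_nil (by omega), if_neg (by omega),
      if_neg (by omega), peel_unfold, if_neg (by omega)]
    simp
  case pos =>
  rw [if_pos (by rw [hlen]; have := mul_pos (by omega : (0:Int) < b - t) (by omega : (0:Int) < r - l - 1); omega)]
  rw [if_neg (by decide), if_pos rfl,
    ioRight_eq r (b - 1) (r - 1 - l).toNat l ps (by omega) rfl]
  simp only []
  set row := (PySem.List.pyRange (l + 1) r 1).map (fun xx => (xx, b - 1)) with hrow
  have hlen2 : ((ps ++ row).length : Int) = H * W - (b - t - 1) * (r - l - 1) := by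
    simp [hrow, PySem.List.length_pyRange_one]
    rw [hlen, max_eq_left (by omega : (0:Int) ≤ r - (l + 1))]; ring
  obtain ⟨f2, rfl⟩ : ∃ f, f1 = f + 1 := ⟨f1 - 1, by omega⟩
  rw [ioLoop]
  by_cases hb2 : t + 2 ≤ b
  case neg =>
    -- b = t + 1: single remaining row, finished after the right phase
    have hb1 : b = t + 1 := by omega
    rw [if_neg (by rw [hlen2, hb1]; simp)]
    rw [peelR, if_pos (by omega), if_neg (by omega),
      show b - 2 = t - 1 by omega, PySem.List.pyRange_neg_one_eq_nil (by omega),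
      peel_unfold, if_neg (by omega)]
    simp [hrow]
  case pos =>
  rw [if_pos (by rw [hlen2]; have := mul_pos (by omega : (0:Int) < b - t - 1) (by omega : (0:Int) < r - l - 1); omega)]
  rw [if_neg (by decide), if_neg (by decide), if_pos rfl,
    ioUp_eq t (r - 1) (b - 1 - t).toNat (b - 1) (ps ++ row) (by omega) rfl]
  simp only []
  rw [show b - 1 - 1 = b - 2 by ring]
  set up := (PySem.List.pyRange (b - 2) (t - 1) (-1)).map (fun yy => (r - 1, yy)) with hup
  have hlen3 : ((ps ++ row ++ up).length : Int) = H * W - (b - t - 1) * (r - l - 2) := by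
    simp [hrow, hup, PySem.List.length_pyRange_one, PySem.List.length_pyRange_neg_one]
    rw [hlen, max_eq_left (by omega : (0:Int) ≤ r - (l + 1)),
      max_eq_left (by omega : (0:Int) ≤ b - 2 - (t - 1))]; ring
  obtain ⟨f3, rfl⟩ : ∃ f, f2 = f + 1 := ⟨f2 - 1, by omega⟩
  rw [ioLoop]
  by_cases hr3 : l + 3 ≤ r
  case neg =>
    -- r = l + 2: two remaining columns, finished after the up phase
    have hr1 : r = l + 2 := by omega
    rw [if_neg (by rw [hlen3, hr1]; simp)]
    rw [peelR, if_pos (by omega), if_pos (by constructor <;> omega),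
      show r - 2 = l by omega, PySem.List.pyRange_neg_one_eq_nil (show (l:Int) ≤ l from le_refl l),
      peel_unfold, if_neg (by omega)]
    simp [hrow, hup, List.append_assoc]
  case pos =>
  rw [if_pos (by rw [hlen3]; have := mul_pos (by omega : (0:Int) < b - t - 1) (by omega : (0:Int) < r - l - 2); omega)]
  rw [if_neg (by decide), if_neg (by decide), if_neg (by decide), if_pos rfl,
    ioLeft_eq (l + 1) t (r - 1 - (l + 1)).toNat (r - 1) (ps ++ row ++ up) (by omega) rfl]
  simp only []
  rw [show r - 1 - 1 = r - 2 by ring, show l + 1 - 1 = l by ring]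
  set lft := (PySem.List.pyRange (r - 2) l (-1)).map (fun xx => (xx, t)) with hlft
  have hlen4 : ((ps ++ row ++ up ++ lft).length : Int) = H * W - (b - t - 2) * (r - l - 2) := by
    simp [hrow, hup, hlft, PySem.List.length_pyRange_one, PySem.List.length_pyRange_neg_one]
    rw [hlen, max_eq_left (by omega : (0:Int) ≤ r - (l + 1)),
      max_eq_left (by omega : (0:Int) ≤ b - 2 - (t - 1)),
      max_eq_left (by omega : (0:Int) ≤ r - 2 - l)]; ring
  obtain ⟨f4, rfl⟩ : ∃ f, f3 = f + 1 := ⟨f3 - 1, by omega⟩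
  rw [ioLoop]
  by_cases hb3 : t + 3 ≤ b
  case neg =>
    -- b = t + 2: nothing left inside; exit at the next length check
    have hb1 : b = t + 2 := by omega
    rw [if_neg (by rw [hlen4, hb1]; simp)]
    rw [peelR, if_pos (by omega), if_pos (by constructor <;> omega),
      peel_unfold, if_neg (by omega)]
    simp [hrow, hup, hlft, List.append_assoc]
  case pos =>
  rw [if_pos (by rw [hlen4]; have := mul_pos (by omega : (0:Int) < b - t - 2) (by omega : (0:Int) < r - l - 2); omega)]
  rw [if_pos rfl,
    ioDown_eq (b - 1) (l + 1) (b - 1 - 1 - t).toNat t (ps ++ row ++ up ++ lft) (by omega) rfl]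
  simp only []
  set col := (PySem.List.pyRange (t + 1) (b - 1) 1).map (fun yy => (l + 1, yy)) with hcol
  have hlen5 : ((ps ++ row ++ up ++ lft ++ col).length : Int)
      = H * W - (b - 1 - (t + 1)) * (r - 1 - (l + 1) - 1) := by
    simp [hrow, hup, hlft, hcol, PySem.List.length_pyRange_one, PySem.List.length_pyRange_neg_one]
    rw [hlen, max_eq_left (by omega : (0:Int) ≤ r - (l + 1)),
      max_eq_left (by omega : (0:Int) ≤ b - 2 - (t - 1)),
      max_eq_left (by omega : (0:Int) ≤ r - 2 - l),
      max_eq_left (by omega : (0:Int) ≤ b - 1 - (t + 1))]; ring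
  have hkpos : 1 ≤ k := by omega
  have ha1 : t + 1 < b - 1 := by omega
  have ha2 : l + 1 < r - 1 := by omega
  have ha3 : b - 1 - (t + 1) ≤ 2 * ((k - 1 : Nat) : Int) + 1 := by
    have : ((k - 1 : Nat) : Int) = (k : Int) - 1 := by omega
    rw [this]; omega
  have ha4 : 4 * (k - 1) + 4 ≤ f4 := by omega
  rw [ih (k - 1) (by omega) f4 (t + 1) (b - 1) (l + 1) (r - 1)
    (ps ++ row ++ up ++ lft ++ col) ha1 ha2 ha3 ha4 hlen5]
  have hg1 : l + 1 < r := by omega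
  have hg2 : t + 1 < b ∧ l + 1 < r := ⟨by omega, by omega⟩
  conv_rhs => rw [peelR, if_pos hg1, if_pos hg2, peel_eq (t + 1) (b - 1) (l + 1) (r - 1) ha1 ha2]
  simp [hrow, hup, hlft, hcol, List.append_assoc]

theorem insideout_eq_peel (H W : Int) (hH : 1 ≤ H) (hW : 1 ≤ W) :
    insideout H W = peel 0 H 0 W := by
  rw [insideout]
  rw [show (4 * (H + W)).toNat + 4 = ((4 * (H + W)).toNat + 3) + 1 from rfl, ioLoop]
  by_cases h1 : H = 1 ∧ W = 1
  · obtain ⟨rfl, rfl⟩ := h1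
    rw [if_neg (by norm_num)]
    rw [peel_unfold, if_pos (by norm_num), peel_unfold, if_neg (by norm_num)]
    have e1 : PySem.List.pyRange (0 : Int) 1 1 = [0] := by decide
    have e2 : PySem.List.pyRange (0 + 1 : Int) 1 1 = [] := by decide
    norm_num [e1, e2]
  · have hHW : 2 ≤ H * W := by
      rcases lt_or_ge 1 H with h | h
      · have := mul_le_mul (le_refl H) hW (by omega) (by omega); omega
      · have hH1 : H = 1 := by omega
        have hW2 : 2 ≤ W := by by_contra hc; exact h1 ⟨hH1, by omega⟩
        have := mul_le_mul (le_refl H) hW2 (by omega) (by omega)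
        omega
    rw [if_pos (by simp; omega), if_pos rfl,
      ioDown_eq H 0 (H - 1 - 0).toNat 0 [(0, 0)] (by omega) rfl]
    simp only []
    have hcol : (0, 0) :: (PySem.List.pyRange (0 + 1) H 1).map (fun yy => ((0 : Int), yy))
        = (PySem.List.pyRange 0 H 1).map (fun yy => ((0 : Int), yy)) := by
      rw [PySem.List.pyRange_one_cons (by omega : (0 : Int) < H)]
      simp
    have hlen1 : ((((PySem.List.pyRange 0 H 1).map (fun yy => ((0 : Int), yy))).length : Int))
        = H * W - (H - 0) * (W - 0 - 1) := by
      simp [PySem.List.length_pyRange_one]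
      rw [max_eq_left (by omega : (0:Int) ≤ H)]; ring
    have hmain := ioLoopR_eq H W H.toNat ((4 * (H + W)).toNat + 3) 0 H 0 W
      ((PySem.List.pyRange 0 H 1).map (fun yy => ((0 : Int), yy)))
      (by omega) (by omega) (by omega) (by omega) hlen1
    rw [show [(0, 0)] ++ (PySem.List.pyRange (0 + 1) H 1).map (fun yy => ((0 : Int), yy))
        = (PySem.List.pyRange 0 H 1).map (fun yy => ((0 : Int), yy)) from by
      rw [← hcol]; simp]
    rw [show (0 : Int) + 1 = 0 + 1 from rfl] at hmain
    rw [hmain, peel_eq 0 H 0 W (by omega) (by omega)]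

theorem foldl_index (W : Int) (ps : List (Int × Int)) :
    ps.foldl (fun acc p => acc ++ [p.1 + p.2 * W]) [] = ps.map (fun p => p.1 + p.2 * W) := by
  rw [PySem.List.foldl_append_singleton_eq_map]; simp

-- ===== VERDICT (by name: the statement is the Claim_ definition above) =====
theorem create_order_spec : Claim_unchanged_create_order := by
  intro H W method _ hpre hnd
  show create_order H W method = create_order_alt H W method
  rcases hpre with ⟨rfl, hH, hW⟩ | ⟨rfl, hcase⟩
  · rw [create_order, create_order_alt]
    simp only [reduceIte]
    rw [foldl_index, wave_eq_zigzag H W hH hW]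
  · have hHW : 1 ≤ H ∧ 1 ≤ W := by
      rcases hcase with h | h
      · exact h
      · by_contra hc
        exact hnd (show D_create_order H W "insideout" from ⟨rfl, hc⟩)
    rw [create_order, create_order_alt]
    rw [foldl_index, insideout_eq_peel H W hHW.1 hHW.2,
      if_neg (by decide : ¬(("insideout" : String) = "ziczac")),
      if_neg (by decide : ¬(("insideout" : String) = "ziczac"))]

theorem create_order_changed : Claim_changed_create_order := by
  unfold Claim_changed_create_order
  refine ⟨by decide, by decide, by decide, by decide, ?_, by decide⟩
  show create_order_alt 0 3 "insideout" = []
  rw [create_order_alt,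
    if_neg (by decide : ¬(("insideout" : String) = "ziczac")),
    if_pos (rfl : ("insideout" : String) = "insideout"),
    peel_unfold, if_neg (by norm_num)]
  simp

theorem create_order_tight : Claim_exact_create_order := by
  intro H W method _ hpre hd
  obtain ⟨rfl, hnb⟩ := hd
  have hHW : H * W ≤ 1 := by
    rcases hpre with ⟨hc, _⟩ | ⟨_, h | h⟩
    · exact absurd hc (by decide)
    · exact absurd h hnb
    · exact h
  have hA : create_order H W "insideout" = [0] := by
    rw [create_order,
      if_neg (by decide : ¬(("insideout" : String) = "ziczac")),
      if_pos (rfl : ("insideout" : String) = "insideout"),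
      insideout, show (4 * (H + W)).toNat + 4 = ((4 * (H + W)).toNat + 3) + 1 from rfl,
      ioLoop, if_neg (by simp; exact hHW)]
    simp
  have hB : create_order_alt H W "insideout" = [] := by
    rw [create_order_alt,
      if_neg (by decide : ¬(("insideout" : String) = "ziczac")),
      if_pos (rfl : ("insideout" : String) = "insideout"),
      peel_unfold, if_neg (by omega)]
    simp
  rw [hA, hB]; simp
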